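-- pv_equiv track=rewrite | github.com/rjb25/RoleplayCardGame | card.py | resolve_location_alias
-- ===== SOURCE A (Python) =====
-- def resolve_location_alias(entity, location_alias, card):
--     match location_alias:
--         case "all":
--             locations = list(entity["locations"].values())
--             slots = []
--             for location in locations:
--                 slots.extend(location)
--             return slots
--         case "card":
--             slots = []
--             if card["location"] in entity["locations"]:
--                 slots.extend(entity["locations"][card["location"]])
--             return slots
--         case _:
--             slots = []
--             location = location_alias
--             if location in entity["locations"]:
--                 slots.extend(entity["locations"][location])
--             return slots
-- ===== SOURCE B (Python) =====
-- def resolve_location_alias(entity, location_alias, card):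
--     target = card["location"] if location_alias == "card" else location_alias
--     return [slot
--             for key, slots in entity["locations"].items()
--             if location_alias == "all" or key == target
--             for slot in slots]
-- ===== Notes on version B (the rewrite author's own statement) =====
-- stated objective: alternative
-- what changed: B has no branches that collect and no dict lookups: it computes one target key, then produces the result as a single flat comprehension over the dict's items, keeping an item's slots iff the alias is 'all' or its key equals the target.
import Mathlib
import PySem

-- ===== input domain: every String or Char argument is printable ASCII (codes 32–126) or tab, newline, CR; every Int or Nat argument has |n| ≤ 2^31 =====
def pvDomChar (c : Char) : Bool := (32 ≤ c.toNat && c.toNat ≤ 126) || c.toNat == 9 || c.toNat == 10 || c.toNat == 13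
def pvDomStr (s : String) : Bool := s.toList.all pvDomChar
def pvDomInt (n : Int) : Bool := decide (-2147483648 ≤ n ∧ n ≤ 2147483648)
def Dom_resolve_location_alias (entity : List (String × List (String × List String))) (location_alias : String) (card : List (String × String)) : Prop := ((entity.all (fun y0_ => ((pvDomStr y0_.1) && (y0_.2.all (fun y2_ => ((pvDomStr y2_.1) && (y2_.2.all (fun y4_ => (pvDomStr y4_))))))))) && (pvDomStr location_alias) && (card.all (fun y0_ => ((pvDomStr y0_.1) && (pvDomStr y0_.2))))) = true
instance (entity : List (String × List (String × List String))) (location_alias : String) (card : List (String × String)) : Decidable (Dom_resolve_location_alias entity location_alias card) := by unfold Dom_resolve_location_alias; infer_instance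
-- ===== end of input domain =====

-- B drops all collecting branches and lookups: one target key, then one flat filter-flatten
-- pass over the dict's items (objective: alternative decomposition, same cost).

-- ===== PORT A =====
def resolve_location_alias (entity : List (String × List (String × List String))) (location_alias : String) (card : List (String × String)) : List String :=
  if location_alias = "all" then
    -- locations = list(entity["locations"].values()); slots = []; for location in locations: slots.extend(location)
    let locations := (PySem.Dict.mk ((PySem.Dict.mk entity).getD "locations" [])).values
    locations.foldl (fun slots location => slots ++ location) []
  else if location_alias = "card" then
    let locs := PySem.Dict.mk ((PySem.Dict.mk entity).getD "locations" [])
    let key := (PySem.Dict.mk card).getD "location" ""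
    let slots : List String := []
    if locs.contains key then slots ++ locs.getD key [] else slots
  else
    let locs := PySem.Dict.mk ((PySem.Dict.mk entity).getD "locations" [])
    let slots : List String := []
    if locs.contains location_alias then slots ++ locs.getD location_alias [] else slots

-- ===== PORT B =====
def resolve_location_alias_alt (entity : List (String × List (String × List String))) (location_alias : String) (card : List (String × String)) : List String :=
  let target := if location_alias = "card" then (PySem.Dict.mk card).getD "location" "" else location_alias
  ((PySem.Dict.mk ((PySem.Dict.mk entity).getD "locations" [])).items).flatMap
    (fun kv => if location_alias = "all" ∨ kv.1 = target then kv.2 else [])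

-- ===== PRECONDITION & SPEC =====
-- Pre_ excludes inputs where Python A raises KeyError (entity missing "locations", or
-- location_alias == "card" with card missing "location"); the keys-Nodup conjunct only states
-- the representation invariant every real Python dict satisfies (an association list with a
-- duplicated key denotes no Python dict), it excludes no Python input.
def Pre_resolve_location_alias (entity : List (String × List (String × List String))) (location_alias : String) (card : List (String × String)) : Prop :=
  (PySem.Dict.mk entity).contains "locations" = true ∧
  (location_alias = "card" → (PySem.Dict.mk card).contains "location" = true) ∧
  (PySem.Dict.mk ((PySem.Dict.mk entity).getD "locations" [])).keys.Nodup
instance (entity : List (String × List (String × List String))) (location_alias : String) (card : List (String × String)) : Decidable (Pre_resolve_location_alias entity location_alias card) := by unfold Pre_resolve_location_alias; infer_instance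

def pvWitness_resolve_location_alias : (List (String × List (String × List String))) × String × (List (String × String)) :=
  ([("locations", [("hand", ["s1", "s2"]), ("deck", ["s3"])])], "all", [("location", "hand")])

def Spec_resolve_location_alias (entity : List (String × List (String × List String))) (location_alias : String) (card : List (String × String)) (out : List String) : Prop := out = resolve_location_alias_alt entity location_alias card
instance (entity : List (String × List (String × List String))) (location_alias : String) (card : List (String × String)) (out : List String) : Decidable (Spec_resolve_location_alias entity location_alias card out) := by unfold Spec_resolve_location_alias; infer_instance

-- ===== CLAIM (what is proved, stated in full; the proofs are below) =====
def Claim_equal_resolve_location_alias : Prop := ∀ (entity : List (String × List (String × List String))) (location_alias : String) (card : List (String × String)), Dom_resolve_location_alias entity location_alias card → Pre_resolve_location_alias entity location_alias card → Spec_resolve_location_alias entity location_alias card (resolve_location_alias entity location_alias card)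

-- ===== LEMMAS AND PROOFS =====

-- ===== VERDICT (by name: the statement is the Claim_ definition above) =====
-- On a nodup association list, keeping only the entries whose key equals t and flattening
-- yields exactly A's guarded lookup value.
theorem flatMap_eq_lookup (l : List (String × List String)) (h : (l.map (·.1)).Nodup) (t : String) :
    l.flatMap (fun kv => if kv.1 = t then kv.2 else [])
      = (if (PySem.Dict.mk l).contains t then ([] : List String) ++ (PySem.Dict.mk l).getD t [] else []) := by
  induction l with
  | nil => simp [PySem.Dict.contains]
  | cons kv rest ih =>
    obtain ⟨hk, hrest⟩ := List.nodup_cons.mp h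
    rw [List.flatMap_cons, PySem.Dict.contains_eq_isSome_get?, PySem.Dict.getD_eq_get?_getD,
        PySem.Dict.get?_mk_cons]
    by_cases hkt : kv.1 = t
    · subst hkt
      have hnone : rest.flatMap (fun kv' => if kv'.1 = kv.1 then kv'.2 else []) = [] := by
        apply List.flatMap_eq_nil_iff.mpr
        intro p hp
        have hne : p.1 ≠ kv.1 := fun he => hk (by simpa [← he] using List.mem_map_of_mem (f := (·.1)) hp)
        simp [hne]
      simp [hnone]
    · have hbeq : (kv.1 == t) = false := beq_eq_false_iff_ne.mpr hkt
      rw [ih hrest, PySem.Dict.contains_eq_isSome_get?, PySem.Dict.getD_eq_get?_getD]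
      simp [hbeq, hkt]

-- Flattening all items' values is A's values-concatenation loop.
theorem flatMap_items_eq_values_foldl (d : PySem.Dict String (List String)) :
    d.items.flatMap (fun kv => kv.2) = d.values.foldl (fun slots location => slots ++ location) [] := by
  have : d.values.foldl (fun slots location => slots ++ location) [] = d.values.flatten := by
    induction d.values using List.reverseRecOn with
    | nil => simp
    | append_singleton xs x ih => simp [List.foldl_append, ih]
  rw [this, PySem.Dict.values, List.flatMap_def]

theorem resolve_location_alias_spec : Claim_equal_resolve_location_alias := by
  intro entity location_alias card _ hpre
  obtain ⟨_, _, hnd⟩ := hpre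
  unfold Spec_resolve_location_alias resolve_location_alias resolve_location_alias_alt
  by_cases hall : location_alias = "all"
  · simp only [hall, reduceIte]
    rw [← flatMap_items_eq_values_foldl]
    simp
  · by_cases hcard : location_alias = "card" <;>
      simp only [hall, hcard, String.reduceEq, reduceIte, false_or] <;>
      exact (flatMap_eq_lookup _ (by simpa [PySem.Dict.keys] using hnd) _).symm
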